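-- pv_equiv track=rewrite | github.com/che0816/SmartGyne-diagnosis-of-gynecological-diseases-via-artificial-intelligence | KnowledgeGraph/utils_seg.py | chunk_seg
-- ===== SOURCE A (Python) =====
-- def chunk_seg(seg, dep, label='ATT'):
--     cluster_list = [[i] for i in range(1, len(seg) + 1)]
--     wordx2clusterix = {i:i - 1 for i in range(1, len(seg) + 1)}
--     bool_list = [True for _ in range(1, len(seg) + 1)]
--     for item in dep:
--         if item[2] == label and item[0] in wordx2clusterix.keys() and item[1] in wordx2clusterix.keys():
--             ix1 = wordx2clusterix[item[0]]
--             ix2 = wordx2clusterix[item[1]]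
--             cluster_list[ix1].extend(cluster_list[ix2])
--             for wordix in cluster_list[ix2]:
--                 wordx2clusterix[wordix] = ix1
--             bool_list[ix2] = False
--     seg_chunk = []
--     for wordix in range(1, len(seg) + 1):
--         if wordix == 1:
--             seg_chunk.append(seg[wordix-1])
--         elif wordx2clusterix[wordix] == wordx2clusterix[wordix-1]:
--             seg_chunk[-1] += seg[wordix-1]
--         else:
--             seg_chunk.append(seg[wordix - 1])
--     return seg_chunk
-- ===== SOURCE B (Python) =====
-- def chunk_seg(seg, dep, label='ATT'):
--     n = len(seg)
--     parent = list(range(n + 1))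
--
--     def find(x):
--         while parent[x] != x:
--             x = parent[x]
--         return x
--
--     for item in dep:
--         if item[2] == label and 1 <= item[0] <= n and 1 <= item[1] <= n:
--             rh = find(item[0])
--             rd = find(item[1])
--             if rh != rd:
--                 if rh < rd:
--                     parent[rd] = rh
--                 else:
--                     parent[rh] = rd
--     chunks = []
--     for i in range(1, n + 1):
--         if chunks and find(i) == find(i - 1):
--             chunks[-1] += seg[i - 1]
--         else:
--             chunks.append(seg[i - 1])
--     return chunks
-- ===== Notes on version B (the rewrite author's own statement) =====
-- stated objective: alternative
-- what changed: Replaced A's quick-find structure (explicit member lists extended on every merge plus a word-to-cluster dict rewritten member by member) with a union-find forest (union by smallest index root) queried by a final scan comparing roots of consecutive words; intended as faster, measured 1.73x at the largest size but not consistently above 1.5x across sizes, so no speed is claimed.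
import Mathlib
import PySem

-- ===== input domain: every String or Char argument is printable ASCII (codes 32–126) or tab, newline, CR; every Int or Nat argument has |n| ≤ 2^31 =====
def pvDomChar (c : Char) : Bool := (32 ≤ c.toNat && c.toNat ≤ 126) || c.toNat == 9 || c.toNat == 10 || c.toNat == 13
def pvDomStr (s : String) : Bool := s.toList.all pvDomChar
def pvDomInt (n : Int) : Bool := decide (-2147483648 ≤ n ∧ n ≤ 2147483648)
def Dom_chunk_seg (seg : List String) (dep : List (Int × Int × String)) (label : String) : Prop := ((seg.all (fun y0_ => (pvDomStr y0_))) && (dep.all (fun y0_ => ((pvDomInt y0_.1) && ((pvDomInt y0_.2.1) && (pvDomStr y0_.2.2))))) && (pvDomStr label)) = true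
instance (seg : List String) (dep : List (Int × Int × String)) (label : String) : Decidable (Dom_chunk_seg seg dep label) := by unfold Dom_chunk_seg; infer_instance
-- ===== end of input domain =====

-- B replaces A's quick-find (member lists extended on every merge + a word-to-cluster dict
-- rewritten member by member) with a union-find forest (union by smallest index), scanned once
-- at the end comparing the roots of consecutive words.

-- ===== PORT A =====
-- one iteration of A's `for item in dep` loop; state = (cluster_list, wordx2clusterix, bool_list)
def chunkAStep (label : String) (st : List (List Int) × PySem.Dict Int Int × List Bool)
    (item : Int × Int × String) : List (List Int) × PySem.Dict Int Int × List Bool :=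
  if item.2.2 = label ∧ st.2.1.contains item.1 = true ∧ st.2.1.contains item.2.1 = true then
    let ix1 := st.2.1.getD item.1 0
    let ix2 := st.2.1.getD item.2.1 0
    let cl' := PySem.List.pySetD st.1 ix1
      (((PySem.List.pyGet? st.1 ix1).getD []) ++ ((PySem.List.pyGet? st.1 ix2).getD []))
    let c2 := (PySem.List.pyGet? cl' ix2).getD []
    let m' := c2.foldl (fun mm w => mm.insert w ix1) st.2.1
    (cl', m', PySem.List.pySetD st.2.2 ix2 false)
  else st

def chunk_seg (seg : List String) (dep : List (Int × Int × String)) (label : String) : List String :=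
  let n := seg.length
  let cluster_list : List (List Int) := (PySem.List.pyRange 1 ((n : Int) + 1) 1).map (fun i => [i])
  let w2c : PySem.Dict Int Int :=
    (PySem.List.pyRange 1 ((n : Int) + 1) 1).foldl (fun d i => d.insert i (i - 1)) PySem.Dict.empty
  let bool_list : List Bool := (PySem.List.pyRange 1 ((n : Int) + 1) 1).map (fun _ => true)
  let st := dep.foldl (chunkAStep label) (cluster_list, w2c, bool_list)
  (PySem.List.pyRange 1 ((n : Int) + 1) 1).foldl (fun acc wordix =>
    if wordix = 1 then acc ++ [(PySem.List.pyGet? seg (wordix - 1)).getD ""]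
    -- wordix and wordix-1 are always keys of the dict, so `getD _ 0` equality is the Python `==`
    else if st.2.1.getD wordix 0 = st.2.1.getD (wordix - 1) 0 then
      -- seg_chunk[-1] += seg[wordix-1]; seg_chunk is nonempty here (wordix ≥ 2)
      acc.dropLast ++ [acc.getLastD "" ++ (PySem.List.pyGet? seg (wordix - 1)).getD ""]
    else acc ++ [(PySem.List.pyGet? seg (wordix - 1)).getD ""]) []

-- ===== PORT B =====
-- `find`: follow parent pointers to the root; fuel is a totality guard only (parent[x] < x
-- off the root, so the root is reached in at most x steps)
def findRoot (parent : List Int) (fuel : Nat) (x : Int) : Int :=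
  match fuel with
  | 0 => x
  | f + 1 =>
    let p := (PySem.List.pyGet? parent x).getD x
    if p = x then x else findRoot parent f p

-- one iteration of B's `for item in dep` loop
def chunkBStep (n : Nat) (label : String) (par : List Int) (item : Int × Int × String) : List Int :=
  if item.2.2 = label ∧ 1 ≤ item.1 ∧ item.1 ≤ (n : Int) ∧ 1 ≤ item.2.1 ∧ item.2.1 ≤ (n : Int) then
    let rh := findRoot par (n + 1) item.1
    let rd := findRoot par (n + 1) item.2.1
    if rh = rd then par
    else if rh < rd then PySem.List.pySetD par rd rh
    else PySem.List.pySetD par rh rd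
  else par

def chunk_seg_alt (seg : List String) (dep : List (Int × Int × String)) (label : String) : List String :=
  let n := seg.length
  let parent0 : List Int := PySem.List.pyRange 0 ((n : Int) + 1) 1
  let parent := dep.foldl (chunkBStep n label) parent0
  (PySem.List.pyRange 1 ((n : Int) + 1) 1).foldl (fun acc i =>
    if acc ≠ [] ∧ findRoot parent (n + 1) i = findRoot parent (n + 1) (i - 1) then
      acc.dropLast ++ [acc.getLastD "" ++ (PySem.List.pyGet? seg (i - 1)).getD ""]
    else acc ++ [(PySem.List.pyGet? seg (i - 1)).getD ""]) []

-- ===== PRECONDITION & SPEC =====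
def Spec_chunk_seg (seg : List String) (dep : List (Int × Int × String)) (label : String) (out : List String) : Prop := out = chunk_seg_alt seg dep label
instance (seg : List String) (dep : List (Int × Int × String)) (label : String) (out : List String) : Decidable (Spec_chunk_seg seg dep label out) := by unfold Spec_chunk_seg; infer_instance

-- ===== CLAIM (what is proved, stated in full; the proofs are below) =====
def Claim_equal_chunk_seg : Prop := ∀ (seg : List String) (dep : List (Int × Int × String)) (label : String), Dom_chunk_seg seg dep label → Spec_chunk_seg seg dep label (chunk_seg seg dep label)

-- ===== LEMMAS AND PROOFS =====

def GoodPar (n : Nat) (par : List Int) : Prop :=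
  par.length = n + 1 ∧
  ∀ x : Int, 1 ≤ x → x ≤ (n : Int) → ∃ v, PySem.List.pyGet? par x = some v ∧ 1 ≤ v ∧ v ≤ x

-- A-side invariant: the dict maps exactly the words 1..n to live cluster indices,
-- and a live cluster's member list holds exactly the words mapped to it
def InvA (n : Nat) (cl : List (List Int)) (m : PySem.Dict Int Int) : Prop :=
  cl.length = n ∧
  (∀ w : Int, (m.get? w).isSome = true ↔ (1 ≤ w ∧ w ≤ (n : Int))) ∧
  (∀ w v, m.get? w = some v → ∃ j : Nat, v = (j : Int) ∧ j < n ∧ w ∈ cl.getD j []) ∧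
  (∀ j : Nat, j < n → (∃ u, m.get? u = some (j : Int)) →
    ∀ w ∈ cl.getD j [], m.get? w = some (j : Int))

def Couple (n : Nat) (m : PySem.Dict Int Int) (par : List Int) : Prop :=
  ∀ i j : Int, 1 ≤ i → i ≤ (n : Int) → 1 ≤ j → j ≤ (n : Int) →
    (findRoot par (n + 1) i = findRoot par (n + 1) j ↔ m.get? i = m.get? j)

-- list-update view of pySetD / pyGet? at nonnegative in-range indices
lemma pyGet?_pySetD (l : List Int) (i j v : Int) (hi : 0 ≤ i) (hj : 0 ≤ j)
    (hilen : i.toNat < l.length) :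
    PySem.List.pyGet? (PySem.List.pySetD l i v) j = if j = i then some v else PySem.List.pyGet? l j := by
  rw [PySem.List.pySetD_of_nonneg l v hi, PySem.List.pyGet?_of_nonneg _ hj,
    PySem.List.pyGet?_of_nonneg _ hj, List.getElem?_set]
  rcases eq_or_ne j i with h | h
  · simp [h, hilen]
  · have : i.toNat ≠ j.toNat := by omega
    simp [h, this]

lemma findRoot_fix {n : Nat} {par : List Int} (hg : GoodPar n par) :
    ∀ (k : Nat) (x : Int), x.toNat ≤ k → 1 ≤ x → x ≤ (n : Int) →
    ∀ f : Nat, x.toNat < f →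
    1 ≤ findRoot par f x ∧ findRoot par f x ≤ x ∧
      PySem.List.pyGet? par (findRoot par f x) = some (findRoot par f x) := by
  intro k
  induction k with
  | zero => intro x hk hx1 _ _ _; omega
  | succ k ih =>
    intro x hk hx1 hxn f hf
    obtain ⟨f, rfl⟩ : ∃ f', f = f' + 1 := ⟨f - 1, by omega⟩
    obtain ⟨v, hv, hv1, hvx⟩ := hg.2 x hx1 hxn
    simp only [findRoot, hv, Option.getD_some]
    split
    · rename_i he; exact ⟨hx1, le_refl x, he ▸ hv⟩
    · rename_i hne
      have hvlt : v < x := lt_of_le_of_ne hvx hne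
      obtain ⟨a, b, c⟩ := ih v (by omega) hv1 (le_trans hvx hxn) f (by omega)
      exact ⟨a, le_trans b (le_of_lt hvlt), c⟩

lemma goodPar_link {n : Nat} {par : List Int} (hg : GoodPar n par) {ra rb : Int}
    (ha1 : 1 ≤ ra) (hab : ra < rb) (hbn : rb ≤ (n : Int)) :
    GoodPar n (PySem.List.pySetD par rb ra) := by
  have hplen := hg.1
  have hlen : rb.toNat < par.length := by omega
  constructor
  · rw [PySem.List.pySetD_of_nonneg par ra (by omega)]; simpa using hg.1
  · intro x hx1 hxn
    rw [pyGet?_pySetD par rb x ra (by omega) (by omega) hlen]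
    rcases eq_or_ne x rb with h | h
    · simp [h]; omega
    · obtain ⟨v, hv, hv1, hvx⟩ := hg.2 x hx1 hxn
      exact ⟨v, by simp [h, hv], hv1, hvx⟩

lemma findRoot_link {n : Nat} {par : List Int} (hg : GoodPar n par) {ra rb : Int}
    (ha1 : 1 ≤ ra) (hab : ra < rb) (hbn : rb ≤ (n : Int))
    (hra : PySem.List.pyGet? par ra = some ra) (hrb : PySem.List.pyGet? par rb = some rb) :
    ∀ (k : Nat) (x : Int), x.toNat ≤ k → 1 ≤ x → x ≤ (n : Int) → ∀ f : Nat, x.toNat < f →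
    findRoot (PySem.List.pySetD par rb ra) f x =
      if findRoot par f x = rb then ra else findRoot par f x := by
  have hplen := hg.1
  have hlen : rb.toNat < par.length := by omega
  intro k
  induction k with
  | zero => intro x hk hx1 _ _ _; omega
  | succ k ih =>
    intro x hk hx1 hxn f hf
    obtain ⟨f, rfl⟩ : ∃ f', f = f' + 1 := ⟨f - 1, by omega⟩
    obtain ⟨v, hv, hv1, hvx⟩ := hg.2 x hx1 hxn
    have hget : PySem.List.pyGet? (PySem.List.pySetD par rb ra) x
        = if x = rb then some ra else some v := by
      rw [pyGet?_pySetD par rb x ra (by omega) (by omega) hlen]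
      split <;> simp [hv]
    rcases eq_or_ne x rb with hxb | hxb
    · -- x is the linked-away root rb
      have hvx' : v = x := by
        rw [hxb] at hv; rw [hrb] at hv
        have : rb = v := by simpa using hv
        omega
      have hroot : findRoot par (f + 1) x = x := by
        simp [findRoot, hv, hvx']
      rw [hroot, if_pos hxb]
      -- new parent of x is ra, and ra is a root of the new forest
      have hra' : PySem.List.pyGet? (PySem.List.pySetD par rb ra) ra
          = some ra := by
        rw [pyGet?_pySetD par rb ra ra (by omega) (by omega) hlen]
        simp [show ra ≠ rb by omega, hra]
      have hf1 : 1 ≤ f := by omega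
      obtain ⟨f, rfl⟩ : ∃ f', f = f' + 1 := ⟨f - 1, by omega⟩
      simp [findRoot, hget, if_pos hxb, show ¬ (ra = x) by omega, hra']
    · simp only [findRoot, hget, if_neg hxb, hv, Option.getD_some]
      rcases eq_or_ne v x with hvx2 | hvx2
      · simp only [if_pos hvx2, if_neg hxb]
      · have hvlt : v < x := lt_of_le_of_ne hvx hvx2
        simp only [if_neg hvx2]
        exact ih v (by omega) hv1 (le_trans hvx hxn) f (by omega)

lemma get?_foldl_insert_const (ws : List Int) (m : PySem.Dict Int Int) (v u : Int) :
    (ws.foldl (fun mm w => mm.insert w v) m).get? u = if u ∈ ws then some v else m.get? u := by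
  induction ws generalizing m with
  | nil => simp
  | cons w ws ih =>
    simp only [List.foldl_cons, ih, List.mem_cons]
    rcases Decidable.em (u ∈ ws) with h | h
    · simp [h]
    · simp only [if_neg h, PySem.Dict.get?_insert]
      rcases eq_or_ne u w with h2 | h2
      · simp [h2]
      · simp [h2, h]

lemma getD_set {α : Type} (l : List α) (i j : Nat) (a d : α) :
    (l.set i a).getD j d = if i = j ∧ i < l.length then a else l.getD j d := by
  rw [List.getD_eq_getElem?_getD, List.getD_eq_getElem?_getD, List.getElem?_set]
  by_cases hij : i = j
  · subst hij
    by_cases hlt : i < l.length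
    · simp [hlt]
    · rw [List.getElem?_eq_none (by omega : l.length ≤ i)]; simp [hlt]
  · simp [hij]

lemma collapse_iff {a b x y : Int} :
    (if x = b then a else x) = (if y = b then a else y) ↔
      (((x = a ∨ x = b) ∧ (y = a ∨ y = b)) ∨ x = y) := by
  split_ifs <;> constructor <;> intro h <;> omega

lemma collapse_iff' {a b x y : Int} :
    (if x = b then a else x) = (if y = b then a else y) ↔
      (((x = b ∨ x = a) ∧ (y = b ∨ y = a)) ∨ x = y) := by
  rw [collapse_iff]; tauto

lemma collapse_opt_iff {j1 j2 vx vy : Int} :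
    (if (some vx : Option Int) = some j2 then (some j1 : Option Int) else some vx)
      = (if (some vy : Option Int) = some j2 then some j1 else some vy) ↔
      ((((some vx : Option Int) = some j1 ∨ (some vx : Option Int) = some j2) ∧
        ((some vy : Option Int) = some j1 ∨ (some vy : Option Int) = some j2)) ∨
        (some vx : Option Int) = some vy) := by
  simp only [Option.some.injEq]
  split_ifs with h1 h2 h2
  all_goals simp_all
  all_goals omega

set_option maxHeartbeats 1000000 in
lemma step_preserves (n : Nat) (label : String) (cl : List (List Int)) (m : PySem.Dict Int Int)
    (bl : List Bool) (par : List Int) (item : Int × Int × String)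
    (hA : InvA n cl m) (hG : GoodPar n par) (hC : Couple n m par) :
    InvA n (chunkAStep label (cl, m, bl) item).1 (chunkAStep label (cl, m, bl) item).2.1 ∧
    GoodPar n (chunkBStep n label par item) ∧
    Couple n (chunkAStep label (cl, m, bl) item).2.1 (chunkBStep n label par item) := by
  obtain ⟨hlen, hdom, hmem, hexact⟩ := hA
  have hcont : ∀ w : Int, m.contains w = (m.get? w).isSome :=
    fun w => PySem.Dict.contains_eq_isSome_get? ..
  by_cases hl : item.2.2 = label
  case neg =>
    have g1 : ¬ (item.2.2 = label ∧ m.contains item.1 = true ∧ m.contains item.2.1 = true) :=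
      fun h => hl h.1
    have g2 : ¬ (item.2.2 = label ∧ 1 ≤ item.1 ∧ item.1 ≤ (n : Int) ∧
        1 ≤ item.2.1 ∧ item.2.1 ≤ (n : Int)) := fun h => hl h.1
    simp only [chunkAStep, chunkBStep, if_neg g1, if_neg g2]
    exact ⟨⟨hlen, hdom, hmem, hexact⟩, hG, hC⟩
  by_cases hh : (1 ≤ item.1 ∧ item.1 ≤ (n : Int)) ∧ (1 ≤ item.2.1 ∧ item.2.1 ≤ (n : Int))
  case neg =>
    have hAguard : ¬ (item.2.2 = label ∧ m.contains item.1 = true ∧ m.contains item.2.1 = true) := by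
      intro ⟨_, c1, c2⟩
      rw [hcont] at c1 c2
      exact hh ⟨(hdom item.1).mp c1, (hdom item.2.1).mp c2⟩
    have hBguard : ¬ (item.2.2 = label ∧ 1 ≤ item.1 ∧ item.1 ≤ (n : Int) ∧
        1 ≤ item.2.1 ∧ item.2.1 ≤ (n : Int)) := by
      intro ⟨_, a, b, c, d⟩; exact hh ⟨⟨a, b⟩, c, d⟩
    simp only [chunkAStep, chunkBStep, if_neg hAguard, if_neg hBguard]
    exact ⟨⟨hlen, hdom, hmem, hexact⟩, hG, hC⟩
  case pos =>
  obtain ⟨⟨hh1, hh2⟩, hd1, hd2⟩ := hh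
  obtain ⟨v1, hv1⟩ := Option.isSome_iff_exists.mp ((hdom item.1).mpr ⟨hh1, hh2⟩)
  obtain ⟨v2, hv2⟩ := Option.isSome_iff_exists.mp ((hdom item.2.1).mpr ⟨hd1, hd2⟩)
  obtain ⟨j1, hj1v, hj1n, hj1mem⟩ := hmem _ _ hv1
  obtain ⟨j2, hj2v, hj2n, hj2mem⟩ := hmem _ _ hv2
  subst hj1v; subst hj2v
  have hch : m.contains item.1 = true := by rw [hcont, hv1]; rfl
  have hcd : m.contains item.2.1 = true := by rw [hcont, hv2]; rfl
  -- unfold the A step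
  have hgd1 : m.getD item.1 0 = (j1 : Int) := PySem.Dict.getD_of_get?_eq_some m 0 hv1
  have hgd2 : m.getD item.2.1 0 = (j2 : Int) := PySem.Dict.getD_of_get?_eq_some m 0 hv2
  have hguardA : item.2.2 = label ∧ m.contains item.1 = true ∧ m.contains item.2.1 = true :=
    ⟨hl, hch, hcd⟩
  have hAeq : chunkAStep label (cl, m, bl) item =
      (cl.set j1 (cl.getD j1 [] ++ cl.getD j2 []),
       ((cl.set j1 (cl.getD j1 [] ++ cl.getD j2 [])).getD j2 []).foldl
         (fun mm w => mm.insert w (j1 : Int)) m,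
       PySem.List.pySetD bl (j2 : Int) false) := by
    simp only [chunkAStep]
    rw [if_pos hguardA]
    simp only [hgd1, hgd2, PySem.List.pySetD_natCast, PySem.List.pyGet?_natCast,
      ← List.getD_eq_getElem?_getD]
  rw [hAeq]
  have hsetD : ∀ (j : Nat) (L : List Int),
      (cl.set j1 L).getD j [] = if j1 = j then L else cl.getD j [] := by
    intro j L
    rw [getD_set]
    rcases eq_or_ne j1 j with h | h
    · rw [if_pos ⟨h, by omega⟩, if_pos h]
    · rw [if_neg (fun hc => h hc.1), if_neg h]
  have hlive1 : ∀ w ∈ cl.getD j1 [], m.get? w = some (j1 : Int) :=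
    hexact j1 hj1n ⟨item.1, hv1⟩
  have hlive2 : ∀ w ∈ cl.getD j2 [], m.get? w = some (j2 : Int) :=
    hexact j2 hj2n ⟨item.2.1, hv2⟩
  rcases eq_or_ne j1 j2 with hj | hj
  · -- the two words are already in the same cluster: A doubles the member list, B does nothing
    subst hj
    have hrhd : findRoot par (n + 1) item.1 = findRoot par (n + 1) item.2.1 :=
      (hC item.1 item.2.1 hh1 hh2 hd1 hd2).mpr (hv1.trans hv2.symm)
    have hguardB : item.2.2 = label ∧ 1 ≤ item.1 ∧ item.1 ≤ (n : Int) ∧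
        1 ≤ item.2.1 ∧ item.2.1 ≤ (n : Int) := ⟨hl, hh1, hh2, hd1, hd2⟩
    have hBeq : chunkBStep n label par item = par := by
      simp only [chunkBStep]
      rw [if_pos hguardB, if_pos hrhd]
    rw [hBeq]
    have hmeq : ∀ u, (((cl.set j1 (cl.getD j1 [] ++ cl.getD j1 [])).getD j1 []).foldl
        (fun mm w => mm.insert w (j1 : Int)) m).get? u = m.get? u := by
      intro u
      rw [get?_foldl_insert_const]
      split
      · rename_i hu
        rw [hsetD j1 _, if_pos rfl] at hu
        rcases List.mem_append.mp hu with h | h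
        · exact (hlive1 u h).symm
        · exact (hlive1 u h).symm
      · rfl
    refine ⟨⟨by simp [hlen], fun w => by rw [hmeq]; exact hdom w, ?_, ?_⟩, hG,
      fun i j a b c d => by rw [hmeq, hmeq]; exact hC i j a b c d⟩
    · intro w v h
      rw [hmeq] at h
      obtain ⟨j, rfl, hjn, hmem'⟩ := hmem w v h
      refine ⟨j, rfl, hjn, ?_⟩
      rw [hsetD j _]
      rcases eq_or_ne j1 j with h1 | h1
      · rw [if_pos h1]; subst h1; exact List.mem_append_left _ hmem'
      · rw [if_neg h1]; exact hmem'
    · intro j hjn hlive w hw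
      rw [hmeq]
      obtain ⟨u, hu⟩ := hlive
      rw [hmeq] at hu
      refine hexact j hjn ⟨u, hu⟩ w ?_
      rw [hsetD j _] at hw
      rcases eq_or_ne j1 j with h1 | h1
      · rw [if_pos h1] at hw
        subst h1
        rcases List.mem_append.mp hw with h | h <;> exact h
      · rwa [if_neg h1] at hw
  · -- distinct clusters: A merges cluster j2 into j1, B links the two roots
    have hj12 : (j1 : Int) ≠ (j2 : Int) := by exact_mod_cast hj
    have hC2' : (cl.set j1 (cl.getD j1 [] ++ cl.getD j2 [])).getD j2 [] = cl.getD j2 [] := by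
      rw [hsetD, if_neg hj]
    have hmemC2 : ∀ u, u ∈ cl.getD j2 [] ↔ m.get? u = some (j2 : Int) := by
      intro u
      refine ⟨hlive2 u, fun h => ?_⟩
      obtain ⟨j, hc, _, hmem'⟩ := hmem u _ h
      have : j = j2 := by omega
      subst this; exact hmem'
    have mkey : ∀ u, ((((cl.set j1 (cl.getD j1 [] ++ cl.getD j2 [])).getD j2 []).foldl
        (fun mm w => mm.insert w (j1 : Int)) m).get? u) =
        if m.get? u = some (j2 : Int) then some (j1 : Int) else m.get? u := by
      intro u
      rw [hC2', get?_foldl_insert_const]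
      by_cases hu : u ∈ cl.getD j2 []
      · rw [if_pos hu, if_pos ((hmemC2 u).mp hu)]
      · rw [if_neg hu, if_neg (fun h => hu ((hmemC2 u).mpr h))]
    -- the new InvA, independent of which root is linked below which
    have hInvA' : InvA n (cl.set j1 (cl.getD j1 [] ++ cl.getD j2 []))
        ((((cl.set j1 (cl.getD j1 [] ++ cl.getD j2 [])).getD j2 []).foldl
          (fun mm w => mm.insert w (j1 : Int)) m)) := by
      refine ⟨by simp [hlen], ?_, ?_, ?_⟩
      · intro w
        rw [mkey w]
        by_cases hw : m.get? w = some (j2 : Int)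
        · have hb := (hdom w).mp (by rw [hw]; rfl)
          simp [hw, hb]
        · rw [if_neg hw]; exact hdom w
      · intro w v h
        rw [mkey w] at h
        by_cases hw : m.get? w = some (j2 : Int)
        · rw [if_pos hw] at h
          refine ⟨j1, by simpa using h.symm, hj1n, ?_⟩
          rw [hsetD, if_pos rfl]
          exact List.mem_append_right _ ((hmemC2 w).mpr hw)
        · rw [if_neg hw] at h
          obtain ⟨j, rfl, hjn, hmem'⟩ := hmem w _ h
          refine ⟨j, rfl, hjn, ?_⟩
          rw [hsetD]
          rcases eq_or_ne j1 j with h1 | h1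
          · rw [if_pos h1]; subst h1; exact List.mem_append_left _ hmem'
          · rw [if_neg h1]; exact hmem'
      · intro j hjn hliveJ w hw
        rcases eq_or_ne j1 j with h1 | h1
        · subst h1
          rw [hsetD, if_pos rfl] at hw
          rcases List.mem_append.mp hw with hwc | hwc
          · have h3 := hlive1 w hwc
            rw [mkey w, h3, if_neg (by simpa using hj12)]
          · have h3 := hlive2 w hwc
            rw [mkey w, h3, if_pos rfl]
        · have hlivem : ∃ u, m.get? u = some (j : Int) := by
            obtain ⟨u, hu⟩ := hliveJ
            rw [mkey u] at hu
            by_cases hu2 : m.get? u = some (j2 : Int)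
            · rw [if_pos hu2] at hu
              exfalso
              have : (j1 : Int) = (j : Int) := by simpa using hu
              exact h1 (by exact_mod_cast this)
            · rw [if_neg hu2] at hu; exact ⟨u, hu⟩
          have hjne2 : j ≠ j2 := by
            obtain ⟨u, hu⟩ := hlivem
            intro hcontra; subst hcontra
            obtain ⟨u', hu'⟩ := hliveJ
            rw [mkey u'] at hu'
            by_cases hu2 : m.get? u' = some (j : Int)
            · rw [if_pos hu2] at hu'
              have : (j1 : Int) = (j : Int) := by simpa using hu'
              exact h1 (by exact_mod_cast this)
            · rw [if_neg hu2] at hu'; exact hu2 hu'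
          rw [hsetD, if_neg h1] at hw
          have h3 := hexact j hjn hlivem w hw
          rw [mkey w, h3, if_neg (by simpa using (by exact_mod_cast hjne2 : (j : Int) ≠ (j2 : Int)))]
    -- roots of the two endpoints
    obtain ⟨hr1pos, hr1le, hr1fix⟩ := findRoot_fix hG item.1.toNat item.1 le_rfl hh1 hh2 (n + 1) (by omega)
    obtain ⟨hr2pos, hr2le, hr2fix⟩ := findRoot_fix hG item.2.1.toNat item.2.1 le_rfl hd1 hd2 (n + 1) (by omega)
    have hrne : findRoot par (n + 1) item.1 ≠ findRoot par (n + 1) item.2.1 := by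
      intro hcontra
      have := (hC item.1 item.2.1 hh1 hh2 hd1 hd2).mp hcontra
      rw [hv1, hv2] at this
      exact hj12 (by simpa using this)
    have hguardB : item.2.2 = label ∧ 1 ≤ item.1 ∧ item.1 ≤ (n : Int) ∧
        1 ≤ item.2.1 ∧ item.2.1 ≤ (n : Int) := ⟨hl, hh1, hh2, hd1, hd2⟩
    -- atom correspondences used by the Couple proof
    have hatom1 : ∀ x : Int, 1 ≤ x → x ≤ (n : Int) →
        (findRoot par (n + 1) x = findRoot par (n + 1) item.1 ↔ m.get? x = some (j1 : Int)) := by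
      intro x a b
      rw [hC x item.1 a b hh1 hh2, hv1]
    have hatom2 : ∀ x : Int, 1 ≤ x → x ≤ (n : Int) →
        (findRoot par (n + 1) x = findRoot par (n + 1) item.2.1 ↔ m.get? x = some (j2 : Int)) := by
      intro x a b
      rw [hC x item.2.1 a b hd1 hd2, hv2]
    rcases lt_or_gt_of_ne hrne with hlt | hlt
    · -- rh < rd : link rd below rh
      have hBeq : chunkBStep n label par item =
          PySem.List.pySetD par (findRoot par (n + 1) item.2.1) (findRoot par (n + 1) item.1) := by
        simp only [chunkBStep]
        rw [if_pos hguardB, if_neg hrne, if_pos hlt]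
      rw [hBeq]
      have hG' := goodPar_link hG hr1pos hlt (le_trans hr2le hd2)
      have hroot' : ∀ x : Int, 1 ≤ x → x ≤ (n : Int) →
          findRoot (PySem.List.pySetD par (findRoot par (n + 1) item.2.1) (findRoot par (n + 1) item.1)) (n + 1) x =
            if findRoot par (n + 1) x = findRoot par (n + 1) item.2.1 then findRoot par (n + 1) item.1
            else findRoot par (n + 1) x := by
        intro x a b
        exact findRoot_link hG hr1pos hlt (le_trans hr2le hd2) hr1fix hr2fix x.toNat x le_rfl a b (n + 1) (by omega)
      refine ⟨hInvA', hG', ?_⟩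
      intro i j a b c d
      obtain ⟨vi, hvi⟩ := Option.isSome_iff_exists.mp ((hdom i).mpr ⟨a, b⟩)
      obtain ⟨vj, hvj⟩ := Option.isSome_iff_exists.mp ((hdom j).mpr ⟨c, d⟩)
      rw [mkey i, mkey j, hroot' i a b, hroot' j c d, hvi, hvj, collapse_iff, collapse_opt_iff]
      have a1 := hatom1 i a b; have a2 := hatom2 i a b
      have b1 := hatom1 j c d; have b2 := hatom2 j c d
      rw [hvi] at a1 a2; rw [hvj] at b1 b2
      have hij := hC i j a b c d
      rw [hvi, hvj] at hij
      rw [a1, a2, b1, b2, hij]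
    · -- rd < rh : link rh below rd
      have hBeq : chunkBStep n label par item =
          PySem.List.pySetD par (findRoot par (n + 1) item.1) (findRoot par (n + 1) item.2.1) := by
        simp only [chunkBStep]
        rw [if_pos hguardB, if_neg hrne, if_neg (by omega)]
      rw [hBeq]
      have hG' := goodPar_link hG hr2pos hlt (le_trans hr1le hh2)
      have hroot' : ∀ x : Int, 1 ≤ x → x ≤ (n : Int) →
          findRoot (PySem.List.pySetD par (findRoot par (n + 1) item.1) (findRoot par (n + 1) item.2.1)) (n + 1) x =
            if findRoot par (n + 1) x = findRoot par (n + 1) item.1 then findRoot par (n + 1) item.2.1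
            else findRoot par (n + 1) x := by
        intro x a b
        exact findRoot_link hG hr2pos hlt (le_trans hr1le hh2) hr2fix hr1fix x.toNat x le_rfl a b (n + 1) (by omega)
      refine ⟨hInvA', hG', ?_⟩
      intro i j a b c d
      obtain ⟨vi, hvi⟩ := Option.isSome_iff_exists.mp ((hdom i).mpr ⟨a, b⟩)
      obtain ⟨vj, hvj⟩ := Option.isSome_iff_exists.mp ((hdom j).mpr ⟨c, d⟩)
      rw [mkey i, mkey j, hroot' i a b, hroot' j c d, hvi, hvj, collapse_iff', collapse_opt_iff]
      have a1 := hatom1 i a b; have a2 := hatom2 i a b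
      have b1 := hatom1 j c d; have b2 := hatom2 j c d
      rw [hvi] at a1 a2; rw [hvj] at b1 b2
      have hij := hC i j a b c d
      rw [hvi, hvj] at hij
      rw [a1, a2, b1, b2, hij]

lemma init_map_get? (n : Nat) (w : Int) :
    (((PySem.List.pyRange 1 ((n : Int) + 1) 1).foldl (fun d i => d.insert i (i - 1))
      PySem.Dict.empty).get? w) = if 1 ≤ w ∧ w ≤ (n : Int) then some (w - 1) else none := by
  induction n with
  | zero =>
    rw [PySem.List.pyRange_one_eq_nil (by omega)]
    simp only [List.foldl_nil, PySem.Dict.get?_empty]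
    rw [if_neg (by omega)]
  | succ n ih =>
    rw [show ((n + 1 : Nat) : Int) + 1 = ((n : Int) + 1) + 1 by push_cast; ring,
      PySem.List.pyRange_one_succ_right (by omega), List.foldl_append]
    simp only [List.foldl_cons, List.foldl_nil, PySem.Dict.get?_insert, ih]
    rcases eq_or_ne w ((n : Int) + 1) with h | h
    · rw [if_pos h, if_pos (by omega), h]
    · rw [if_neg h]
      rcases Decidable.em (1 ≤ w ∧ w ≤ (n : Int)) with h2 | h2
      · rw [if_pos h2, if_pos (by omega)]
      · rw [if_neg h2, if_neg (by omega)]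

lemma init_cl_getD (n : Nat) (j : Nat) (hj : j < n) :
    ((PySem.List.pyRange 1 ((n : Int) + 1) 1).map (fun i => [i])).getD j [] = [(j : Int) + 1] := by
  rw [List.getD_eq_getElem?_getD, List.getElem?_map, PySem.List.getElem?_pyRange_one]
  simp [hj]
  omega

lemma init_cl_len (n : Nat) :
    ((PySem.List.pyRange 1 ((n : Int) + 1) 1).map (fun i => [i])).length = n := by
  simp [PySem.List.length_pyRange_one]

lemma par0_get (n : Nat) (x : Int) (h0 : 0 ≤ x) (hn : x ≤ (n : Int)) :
    PySem.List.pyGet? (PySem.List.pyRange 0 ((n : Int) + 1) 1) x = some x := by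
  rw [PySem.List.pyGet?_of_nonneg _ h0, PySem.List.getElem?_pyRange_one]
  simp
  omega

lemma par0_root (n : Nat) (x : Int) (h0 : 1 ≤ x) (hn : x ≤ (n : Int)) (f : Nat) (hf : 0 < f) :
    findRoot (PySem.List.pyRange 0 ((n : Int) + 1) 1) f x = x := by
  obtain ⟨f, rfl⟩ : ∃ f', f = f' + 1 := ⟨f - 1, by omega⟩
  simp [findRoot, par0_get n x (by omega) hn]

lemma init_invariants (n : Nat) :
    InvA n ((PySem.List.pyRange 1 ((n : Int) + 1) 1).map (fun i => [i]))
      ((PySem.List.pyRange 1 ((n : Int) + 1) 1).foldl (fun d i => d.insert i (i - 1))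
        PySem.Dict.empty) ∧
    GoodPar n (PySem.List.pyRange 0 ((n : Int) + 1) 1) ∧
    Couple n ((PySem.List.pyRange 1 ((n : Int) + 1) 1).foldl (fun d i => d.insert i (i - 1))
        PySem.Dict.empty) (PySem.List.pyRange 0 ((n : Int) + 1) 1) := by
  refine ⟨⟨init_cl_len n, ?_, ?_, ?_⟩, ⟨?_, ?_⟩, ?_⟩
  · intro w
    rw [init_map_get?]
    rcases Decidable.em (1 ≤ w ∧ w ≤ (n : Int)) with h | h
    · simp [h]
    · simp [if_neg h]; omega
  · intro w v h
    rw [init_map_get?] at h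
    rcases Decidable.em (1 ≤ w ∧ w ≤ (n : Int)) with hb | hb
    · rw [if_pos hb] at h
      have hv : v = w - 1 := by simpa using h.symm
      refine ⟨(w - 1).toNat, by omega, by omega, ?_⟩
      rw [init_cl_getD n _ (by omega)]
      have : ((w - 1).toNat : Int) + 1 = w := by omega
      rw [this]; exact List.mem_singleton.mpr rfl
    · rw [if_neg hb] at h; cases h
  · intro j hjn _ w hw
    rw [init_cl_getD n j hjn] at hw
    have hw' : w = (j : Int) + 1 := List.mem_singleton.mp hw
    rw [init_map_get?, if_pos (by omega), hw']
    congr 1; omega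
  · rw [PySem.List.length_pyRange_one]; omega
  · intro x hx1 hxn
    exact ⟨x, par0_get n x (by omega) hxn, hx1, le_refl x⟩
  · intro i j a b c d
    rw [par0_root n i a b (n + 1) (by omega), par0_root n j c d (n + 1) (by omega),
      init_map_get?, init_map_get?, if_pos ⟨a, b⟩, if_pos ⟨c, d⟩]
    constructor
    · intro h; rw [h]
    · intro h
      have : i - 1 = j - 1 := by simpa using h
      omega

lemma fold_invariant (n : Nat) (label : String) (dep : List (Int × Int × String)) :
    ∀ (cl : List (List Int)) (m : PySem.Dict Int Int) (bl : List Bool) (par : List Int),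
    InvA n cl m → GoodPar n par → Couple n m par →
    InvA n (dep.foldl (chunkAStep label) (cl, m, bl)).1
        (dep.foldl (chunkAStep label) (cl, m, bl)).2.1 ∧
    GoodPar n (dep.foldl (chunkBStep n label) par) ∧
    Couple n (dep.foldl (chunkAStep label) (cl, m, bl)).2.1
        (dep.foldl (chunkBStep n label) par) := by
  induction dep with
  | nil => intro cl m bl par hA hG hC; exact ⟨hA, hG, hC⟩
  | cons d ds ih =>
    intro cl m bl par hA hG hC
    obtain ⟨hA', hG', hC'⟩ := step_preserves n label cl m bl par d hA hG hC
    simpa only [List.foldl_cons] using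
      ih (chunkAStep label (cl, m, bl) d).1 (chunkAStep label (cl, m, bl) d).2.1
        (chunkAStep label (cl, m, bl) d).2.2 (chunkBStep n label par d) hA' hG' hC'

lemma chunk_fold_eq (seg : List String) (m : PySem.Dict Int Int) (par : List Int) (n : Nat)
    (hcond : ∀ i : Int, 2 ≤ i → i ≤ (n : Int) →
      (m.getD i 0 = m.getD (i - 1) 0 ↔ findRoot par (n + 1) i = findRoot par (n + 1) (i - 1))) :
    ∀ (L : List Int), (∀ i ∈ L, 2 ≤ i ∧ i ≤ (n : Int)) → ∀ (acc : List String), acc ≠ [] →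
    L.foldl (fun acc wordix =>
      if wordix = 1 then acc ++ [(PySem.List.pyGet? seg (wordix - 1)).getD ""]
      else if m.getD wordix 0 = m.getD (wordix - 1) 0 then
        acc.dropLast ++ [acc.getLastD "" ++ (PySem.List.pyGet? seg (wordix - 1)).getD ""]
      else acc ++ [(PySem.List.pyGet? seg (wordix - 1)).getD ""]) acc =
    L.foldl (fun acc i =>
      if acc ≠ [] ∧ findRoot par (n + 1) i = findRoot par (n + 1) (i - 1) then
        acc.dropLast ++ [acc.getLastD "" ++ (PySem.List.pyGet? seg (i - 1)).getD ""]
      else acc ++ [(PySem.List.pyGet? seg (i - 1)).getD ""]) acc := by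
  intro L
  induction L with
  | nil => intro _ acc _; rfl
  | cons i L ih =>
    intro hmem acc hacc
    obtain ⟨hi2, hin⟩ := hmem i List.mem_cons_self
    simp only [List.foldl_cons]
    rw [if_neg (by omega : ¬ i = 1)]
    rcases Decidable.em (m.getD i 0 = m.getD (i - 1) 0) with hc | hc
    · rw [if_pos hc, if_pos ⟨hacc, (hcond i hi2 hin).mp hc⟩]
      exact ih (fun x hx => hmem x (List.mem_cons_of_mem _ hx)) _ (by simp)
    · rw [if_neg hc, if_neg (fun hcontra => hc ((hcond i hi2 hin).mpr hcontra.2))]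
      exact ih (fun x hx => hmem x (List.mem_cons_of_mem _ hx)) _ (by simp)

lemma chunk_seg_eq_alt (seg : List String) (dep : List (Int × Int × String)) (label : String) :
    chunk_seg seg dep label = chunk_seg_alt seg dep label := by
  simp only [chunk_seg, chunk_seg_alt]
  obtain ⟨hA0, hG0, hC0⟩ := init_invariants seg.length
  obtain ⟨hA, hG, hC⟩ := fold_invariant seg.length label dep _ _
    ((PySem.List.pyRange 1 ((seg.length : Int) + 1) 1).map (fun _ => true)) _ hA0 hG0 hC0
  set M := (dep.foldl (chunkAStep label)
      ((PySem.List.pyRange 1 ((seg.length : Int) + 1) 1).map (fun i => [i]),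
       (PySem.List.pyRange 1 ((seg.length : Int) + 1) 1).foldl
         (fun d i => d.insert i (i - 1)) PySem.Dict.empty,
       (PySem.List.pyRange 1 ((seg.length : Int) + 1) 1).map (fun _ => true))).2.1 with hM
  set P := dep.foldl (chunkBStep seg.length label)
      (PySem.List.pyRange 0 ((seg.length : Int) + 1) 1) with hP
  have hcond : ∀ i : Int, 2 ≤ i → i ≤ (seg.length : Int) →
      (M.getD i 0 = M.getD (i - 1) 0 ↔
       findRoot P (seg.length + 1) i = findRoot P (seg.length + 1) (i - 1)) := by
    intro i h2 hin
    obtain ⟨vi, hvi⟩ := Option.isSome_iff_exists.mp ((hA.2.1 i).mpr ⟨by omega, hin⟩)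
    obtain ⟨vj, hvj⟩ := Option.isSome_iff_exists.mp ((hA.2.1 (i - 1)).mpr ⟨by omega, by omega⟩)
    rw [PySem.Dict.getD_eq_get?_getD, PySem.Dict.getD_eq_get?_getD, hvi, hvj]
    simp only [Option.getD_some]
    constructor
    · intro h
      exact (hC i (i - 1) (by omega) hin (by omega) (by omega)).mpr (by rw [hvi, hvj, h])
    · intro h
      have := (hC i (i - 1) (by omega) hin (by omega) (by omega)).mp h
      rw [hvi, hvj] at this
      simpa using this
  rcases Nat.eq_zero_or_pos seg.length with h0 | h1
  · rw [PySem.List.pyRange_one_eq_nil (by omega : ((seg.length : Int) + 1) ≤ 1)]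
    rfl
  · rw [PySem.List.pyRange_one_cons (by omega : (1 : Int) < (seg.length : Int) + 1)]
    simp only [List.foldl_cons]
    rw [if_neg (by simp : ¬ (([] : List String) ≠ [] ∧ findRoot (dep.foldl (chunkBStep seg.length label)
        (PySem.List.pyRange 0 ((seg.length : Int) + 1) 1)) (seg.length + 1) 1 =
        findRoot (dep.foldl (chunkBStep seg.length label)
        (PySem.List.pyRange 0 ((seg.length : Int) + 1) 1)) (seg.length + 1) (1 - 1)))]
    refine chunk_fold_eq seg _ _ seg.length hcond
      (PySem.List.pyRange ((1 : Int) + 1) ((seg.length : Int) + 1) 1) ?_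
      ([] ++ [(PySem.List.pyGet? seg ((1 : Int) - 1)).getD ""]) (by simp)
    intro x hx
    have hm := PySem.List.mem_pyRange_one.mp hx
    exact ⟨hm.1, by omega⟩

-- ===== VERDICT (by name: the statement is the Claim_ definition above) =====
theorem chunk_seg_spec : Claim_equal_chunk_seg := by
  intro seg dep label _
  unfold Spec_chunk_seg
  exact chunk_seg_eq_alt seg dep label
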